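-- pv_equiv track=rewrite | github.com/ianwu0907/FYP2025_Ian | spreadsheet-normalizer/encoder.py | extract_k_neighborhood
-- ===== SOURCE A (Python) =====
-- from typing import Set, List, Tuple, Dict, Optional
--
-- def extract_k_neighborhood(indices: Set[int], k: int, max_index: int) -> List[int]:
--     """
--     Expand index set with k-neighborhood to include headers, titles, and notes
--     that are near table boundaries.
--
--     Complexity: O(|indices| * k), which is typically O(num_anchors * k).
--     Since num_anchors << R, this is much faster than O(R²).
--
--     This is Phase 4 of the algorithm, implementing the paper's recommendation
--     to preserve k rows/columns around each structural anchor.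
--
--     Args:
--         indices: Set of anchor indices (row or column numbers)
--         k: Neighborhood radius (typically 2-4)
--         max_index: Maximum valid index (sheet.max_row or sheet.max_column)
--
--     Returns:
--         list: Sorted list of expanded indices within valid range [1, max_index]
--     """
--     expanded = set()
--
--     for idx in indices:
--         # Add k cells before and after each anchor
--         for offset in range(-k, k + 1):
--             expanded_idx = idx + offset
--             # Ensure within valid sheet boundaries
--             if 1 <= expanded_idx <= max_index:
--                 expanded.add(expanded_idx)
--
--     return sorted(expanded)
-- ===== SOURCE B (Python) =====
-- def extract_k_neighborhood(indices, k, max_index):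
--     """Sort the distinct anchors once, then sweep left-to-right emitting each
--     clamped interval [idx-k, idx+k] cut below at one past the highest value
--     already emitted; avoids building a set of all covered indices and the
--     final sort over it."""
--     out = []
--     last = 0  # highest value emitted so far (valid outputs are >= 1)
--     for idx in sorted(set(indices)):
--         lo = max(1, idx - k, last + 1)
--         hi = min(max_index, idx + k)
--         out.extend(range(lo, hi + 1))
--         last = max(last, hi)
--     return out
-- ===== Notes on version B (the rewrite author's own statement) =====
-- stated objective: faster
-- what changed: Instead of inserting every idx+offset of every anchor into a set and sorting that set, B sorts the distinct anchors once and sweeps them in order, emitting each clamped interval [idx-k, idx+k] truncated below at one past the highest value already emitted, so the output is produced already sorted and deduplicated.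
import Mathlib
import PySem

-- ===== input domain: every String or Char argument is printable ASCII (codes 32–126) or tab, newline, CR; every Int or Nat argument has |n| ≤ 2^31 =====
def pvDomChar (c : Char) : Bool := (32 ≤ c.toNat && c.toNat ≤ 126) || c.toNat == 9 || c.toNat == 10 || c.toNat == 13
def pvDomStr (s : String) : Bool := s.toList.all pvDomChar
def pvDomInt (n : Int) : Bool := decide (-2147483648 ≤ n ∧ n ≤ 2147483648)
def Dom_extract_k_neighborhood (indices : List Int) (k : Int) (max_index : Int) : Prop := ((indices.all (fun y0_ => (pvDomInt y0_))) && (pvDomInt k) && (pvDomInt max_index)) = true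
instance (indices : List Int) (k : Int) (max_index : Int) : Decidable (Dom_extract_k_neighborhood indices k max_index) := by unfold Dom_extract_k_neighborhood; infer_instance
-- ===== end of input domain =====

-- B sweeps the sorted distinct anchors once, emitting each clamped interval truncated at
-- what was already emitted (output comes out sorted and deduplicated, no set of all
-- covered indices and no final sort over it).

-- ===== PORT A =====
-- inner loop of A: for offset in range(-k, k+1): add idx+offset if 1 <= . <= max_index
def pvExpandA (k m : Int) (s : PySem.Set Int) (idx : Int) : PySem.Set Int :=
  (PySem.List.pyRange (-k) (k + 1) 1).foldl (fun s offset =>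
    if 1 ≤ idx + offset ∧ idx + offset ≤ m then s.add (idx + offset) else s) s

def extract_k_neighborhood (indices : List Int) (k : Int) (max_index : Int) : List Int :=
  PySem.List.sorted (indices.foldl (pvExpandA k max_index) PySem.Set.empty) (fun x => x)

-- ===== PORT B =====
-- the sweep of Source B: anchors in increasing order, `last` = highest value emitted so far
def pvMergeLoop (k max_index : Int) : List Int → Int → List Int
  | [], _ => []
  | idx :: rest, last =>
    let lo := max (max 1 (idx - k)) (last + 1)
    let hi := min max_index (idx + k)
    PySem.List.pyRange lo (hi + 1) 1 ++ pvMergeLoop k max_index rest (max last hi)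

def extract_k_neighborhood_alt (indices : List Int) (k : Int) (max_index : Int) : List Int :=
  pvMergeLoop k max_index (PySem.List.sorted (PySem.Set.ofList indices) (fun x => x)) 0

-- ===== PRECONDITION & SPEC =====
def Spec_extract_k_neighborhood (indices : List Int) (k : Int) (max_index : Int) (out : List Int) : Prop := out = extract_k_neighborhood_alt indices k max_index
instance (indices : List Int) (k : Int) (max_index : Int) (out : List Int) : Decidable (Spec_extract_k_neighborhood indices k max_index out) := by unfold Spec_extract_k_neighborhood; infer_instance

-- ===== CLAIM (what is proved, stated in full; the proofs are below) =====
def Claim_equal_extract_k_neighborhood : Prop := ∀ (indices : List Int) (k : Int) (max_index : Int), Dom_extract_k_neighborhood indices k max_index → Spec_extract_k_neighborhood indices k max_index (extract_k_neighborhood indices k max_index)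

-- ===== LEMMAS AND PROOFS =====

-- membership in A's inner fold, for an arbitrary offset list
theorem pv_inner_mem (m idx : Int) (L : List Int) (s : PySem.Set Int) (x : Int) :
    x ∈ L.foldl (fun s offset =>
        if 1 ≤ idx + offset ∧ idx + offset ≤ m then s.add (idx + offset) else s) s ↔
      x ∈ s ∨ ∃ o ∈ L, x = idx + o ∧ 1 ≤ x ∧ x ≤ m := by
  induction L generalizing s with
  | nil => simp
  | cons o L ih =>
    simp only [List.foldl_cons, ih, List.mem_cons]
    by_cases h : 1 ≤ idx + o ∧ idx + o ≤ m
    · rw [if_pos h]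
      simp only [PySem.Set.mem_add]
      constructor
      · rintro ((hs | rfl) | ⟨o', ho', rfl, hb⟩)
        · exact Or.inl hs
        · exact Or.inr ⟨o, Or.inl rfl, rfl, h.1, h.2⟩
        · exact Or.inr ⟨o', Or.inr ho', rfl, hb⟩
      · rintro (hs | ⟨o', (rfl | ho'), rfl, hb⟩)
        · exact Or.inl (Or.inl hs)
        · exact Or.inl (Or.inr rfl)
        · exact Or.inr ⟨o', ho', rfl, hb⟩
    · rw [if_neg h]
      constructor
      · rintro (hs | ⟨o', ho', rfl, hb⟩)
        · exact Or.inl hs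
        · exact Or.inr ⟨o', Or.inr ho', rfl, hb⟩
      · rintro (hs | ⟨o', (rfl | ho'), rfl, hb⟩)
        · exact Or.inl hs
        · exact absurd ⟨hb.1, hb.2⟩ h
        · exact Or.inr ⟨o', ho', rfl, hb⟩

theorem pvExpandA_mem (k m : Int) (s : PySem.Set Int) (idx x : Int) :
    x ∈ pvExpandA k m s idx ↔
      x ∈ s ∨ (idx - k ≤ x ∧ x ≤ idx + k ∧ 1 ≤ x ∧ x ≤ m) := by
  unfold pvExpandA
  rw [pv_inner_mem]
  constructor
  · rintro (hs | ⟨o, ho, rfl, hb⟩)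
    · exact Or.inl hs
    · rw [PySem.List.mem_pyRange_one] at ho
      exact Or.inr ⟨by omega, by omega, hb⟩
  · rintro (hs | ⟨h1, h2, hb⟩)
    · exact Or.inl hs
    · exact Or.inr ⟨x - idx, PySem.List.mem_pyRange_one.mpr ⟨by omega, by omega⟩, by omega, hb⟩

theorem pv_inner_nodup (m idx : Int) (L : List Int) (s : PySem.Set Int) (hs : s.Nodup) :
    (L.foldl (fun s offset =>
        if 1 ≤ idx + offset ∧ idx + offset ≤ m then s.add (idx + offset) else s) s).Nodup := by
  induction L generalizing s with
  | nil => exact hs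
  | cons o L ih =>
    simp only [List.foldl_cons]
    split
    · exact ih _ (PySem.Set.nodup_add s _ hs)
    · exact ih _ hs

-- membership and nodup of A's outer fold
theorem pvA_mem (k m : Int) (L : List Int) (s : PySem.Set Int) (x : Int) :
    x ∈ L.foldl (pvExpandA k m) s ↔
      x ∈ s ∨ ∃ i ∈ L, i - k ≤ x ∧ x ≤ i + k ∧ 1 ≤ x ∧ x ≤ m := by
  induction L generalizing s with
  | nil => simp
  | cons i L ih =>
    simp only [List.foldl_cons, ih, pvExpandA_mem, List.mem_cons]
    constructor
    · rintro ((hs | hb) | ⟨j, hj, hb⟩)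
      · exact Or.inl hs
      · exact Or.inr ⟨i, Or.inl rfl, hb⟩
      · exact Or.inr ⟨j, Or.inr hj, hb⟩
    · rintro (hs | ⟨j, (rfl | hj), hb⟩)
      · exact Or.inl (Or.inl hs)
      · exact Or.inl (Or.inr hb)
      · exact Or.inr ⟨j, hj, hb⟩

theorem pvA_nodup (k m : Int) (L : List Int) (s : PySem.Set Int) (hs : s.Nodup) :
    (L.foldl (pvExpandA k m) s).Nodup := by
  induction L generalizing s with
  | nil => exact hs
  | cons i L ih => exact ih _ (pv_inner_nodup m i _ s hs)

-- membership in B's sweep over a strictly increasing anchor list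
theorem pvMerge_mem (k m : Int) (L : List Int) (last x : Int)
    (hp : L.Pairwise (· < ·)) :
    x ∈ pvMergeLoop k m L last ↔
      last < x ∧ 1 ≤ x ∧ x ≤ m ∧ ∃ i ∈ L, i - k ≤ x ∧ x ≤ i + k := by
  induction L generalizing last with
  | nil => simp [pvMergeLoop]
  | cons idx rest ih =>
    rw [List.pairwise_cons] at hp
    simp only [pvMergeLoop, List.mem_append, PySem.List.mem_pyRange_one,
      ih _ hp.2, List.mem_cons]
    constructor
    · rintro (⟨h1, h2⟩ | ⟨h1, h2, h3, i, hi, hb⟩)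
      · exact ⟨by omega, by omega, by omega, idx, Or.inl rfl, by omega, by omega⟩
      · exact ⟨by omega, h2, h3, i, Or.inr hi, hb⟩
    · rintro ⟨h1, h2, h3, i, (rfl | hi), hb⟩
      · exact Or.inl ⟨by omega, by omega⟩
      · have hlt : idx < i := hp.1 i hi
        by_cases hc : max last (min m (idx + k)) < x
        · exact Or.inr ⟨hc, h2, h3, i, hi, hb⟩
        · exact Or.inl ⟨by omega, by omega⟩

-- B's sweep is strictly increasing and stays above `last`
theorem pvMerge_sorted (k m : Int) (L : List Int) (last : Int) :
    (pvMergeLoop k m L last).Pairwise (· < ·) ∧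
      ∀ x ∈ pvMergeLoop k m L last, last < x := by
  induction L generalizing last with
  | nil => simp [pvMergeLoop]
  | cons idx rest ih =>
    obtain ⟨ihp, ihgt⟩ := ih (max last (min m (idx + k)))
    simp only [pvMergeLoop]
    constructor
    · rw [List.pairwise_append]
      refine ⟨PySem.List.pairwise_lt_pyRange_one _ _, ihp, ?_⟩
      intro a ha b hb
      rw [PySem.List.mem_pyRange_one] at ha
      have := ihgt b hb
      omega
    · intro x hx
      rw [List.mem_append] at hx
      rcases hx with hx | hx
      · rw [PySem.List.mem_pyRange_one] at hx; omega
      · have := ihgt x hx; omega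

-- ===== VERDICT (by name: the statement is the Claim_ definition above) =====
theorem extract_k_neighborhood_spec : Claim_equal_extract_k_neighborhood := by
  intro indices k m _
  unfold Spec_extract_k_neighborhood extract_k_neighborhood extract_k_neighborhood_alt
  set anchors := PySem.List.sorted (PySem.Set.ofList indices) (fun x => x) with hanch
  have hpa : anchors.Pairwise (· < ·) := PySem.List.sorted_ofList_pairwise_lt indices
  obtain ⟨hmergeP, _⟩ := pvMerge_sorted k m anchors 0
  apply PySem.List.sorted_eq_of_perm_of_pairwise_lt _ _ _ _ hmergeP
  rw [List.perm_ext_iff_of_nodup (hmergeP.imp (fun h => ne_of_lt h))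
    (pvA_nodup k m indices PySem.Set.empty List.nodup_nil)]
  intro x
  rw [pvMerge_mem k m anchors 0 x hpa, pvA_mem]
  constructor
  · rintro ⟨h0, h1, h2, i, hi, hb⟩
    rw [hanch, PySem.List.mem_sorted, PySem.Set.mem_ofList] at hi
    exact Or.inr ⟨i, hi, hb.1, hb.2, h1, h2⟩
  · rintro (hs | ⟨i, hi, hb⟩)
    · simp [PySem.Set.empty] at hs
    · refine ⟨by omega, by omega, by omega, i, ?_, by omega, by omega⟩
      rw [hanch, PySem.List.mem_sorted, PySem.Set.mem_ofList]
      exact hi
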